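-- pv_equiv track=rewrite | github.com/yousef1508/smidig-prosjekt | components/analyze_btn/analyze_btn.py | categorize_plugins
-- ===== SOURCE A (Python) =====
-- def categorize_plugins(plugins):
--     categories = {
--         "Windows": [],
--         "Linux": [],
--         "Mac": [],
--         "Other": []
--     }
--     for plugin in plugins:
--         if plugin.startswith("windows"):
--             categories["Windows"].append(plugin)
--         elif plugin.startswith("linux"):
--             categories["Linux"].append(plugin)
--         elif plugin.startswith("mac"):
--             categories["Mac"].append(plugin)
--         else:
--             categories["Other"].append(plugin)
--
--     categorized_plugins = []
--     for category, plugin_list in categories.items():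
--         categorized_plugins.append(f"{category} Plugins:")
--         categorized_plugins.extend(plugin_list)
--
--     return categorized_plugins
-- ===== SOURCE B (Python) =====
-- def categorize_plugins(plugins):
--     result = []
--     for label, prefix in (("Windows", "windows"), ("Linux", "linux"), ("Mac", "mac")):
--         result.append(f"{label} Plugins:")
--         result.extend(p for p in plugins if p.startswith(prefix))
--     result.append("Other Plugins:")
--     result.extend(p for p in plugins
--                   if not (p.startswith("windows") or p.startswith("linux") or p.startswith("mac")))
--     return result
-- ===== Notes on version B (the rewrite author's own statement) =====
-- stated objective: simpler
-- what changed: Replaces the distribute-into-a-dict-of-buckets pass followed by a dict.items() flattening loop with direct per-category filtered scans of the input list driven by a (label, prefix) table.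
import Mathlib
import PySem

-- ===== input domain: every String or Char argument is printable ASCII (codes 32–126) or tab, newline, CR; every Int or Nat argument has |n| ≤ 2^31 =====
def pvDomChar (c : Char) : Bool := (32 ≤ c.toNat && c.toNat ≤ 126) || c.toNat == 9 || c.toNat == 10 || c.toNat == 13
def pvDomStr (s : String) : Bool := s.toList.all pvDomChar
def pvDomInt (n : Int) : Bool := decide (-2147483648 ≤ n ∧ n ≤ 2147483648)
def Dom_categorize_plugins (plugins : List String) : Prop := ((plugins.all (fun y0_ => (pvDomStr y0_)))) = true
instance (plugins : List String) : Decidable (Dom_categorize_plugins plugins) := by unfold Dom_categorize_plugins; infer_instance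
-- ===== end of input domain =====

-- B builds the output by per-category filtered scans of the input (table of (label, prefix) pairs)
-- instead of A's distribute-into-buckets pass followed by a dict-items flattening loop.

-- ===== PORT A =====
-- A's single pass distributing each plugin into one of four buckets (the dict of lists),
-- then the dict.items() loop flattening header + bucket in insertion order.
def categorize_plugins (plugins : List String) : List String :=
  let cats := plugins.foldl
    (fun (c : List String × List String × List String × List String) plugin =>
      if PySem.Str.startswith plugin "windows" then (c.1 ++ [plugin], c.2.1, c.2.2.1, c.2.2.2)
      else if PySem.Str.startswith plugin "linux" then (c.1, c.2.1 ++ [plugin], c.2.2.1, c.2.2.2)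
      else if PySem.Str.startswith plugin "mac" then (c.1, c.2.1, c.2.2.1 ++ [plugin], c.2.2.2)
      else (c.1, c.2.1, c.2.2.1, c.2.2.2 ++ [plugin]))
    ([], [], [], [])
  ["Windows Plugins:"] ++ cats.1 ++ ["Linux Plugins:"] ++ cats.2.1
    ++ ["Mac Plugins:"] ++ cats.2.2.1 ++ ["Other Plugins:"] ++ cats.2.2.2

-- ===== PORT B =====
def pvCatTable : List (String × String) :=
  [("Windows", "windows"), ("Linux", "linux"), ("Mac", "mac")]

def categorize_plugins_alt (plugins : List String) : List String :=
  (pvCatTable.foldl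
    (fun acc lp =>
      acc ++ [lp.1 ++ " Plugins:"]
          ++ plugins.filter (fun p => PySem.Str.startswith p lp.2)) [])
  ++ ["Other Plugins:"]
  ++ plugins.filter (fun p =>
      !(PySem.Str.startswith p "windows" || PySem.Str.startswith p "linux"
        || PySem.Str.startswith p "mac"))

-- ===== PRECONDITION & SPEC =====
def Spec_categorize_plugins (plugins : List String) (out : List String) : Prop := out = categorize_plugins_alt plugins
instance (plugins : List String) (out : List String) : Decidable (Spec_categorize_plugins plugins out) := by unfold Spec_categorize_plugins; infer_instance

-- ===== CLAIM (what is proved, stated in full; the proofs are below) =====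
def Claim_equal_categorize_plugins : Prop := ∀ (plugins : List String), Dom_categorize_plugins plugins → Spec_categorize_plugins plugins (categorize_plugins plugins)

-- ===== LEMMAS AND PROOFS =====

-- startswith "windows" and startswith "linux"/"mac" are mutually exclusive (distinct first characters)
theorem pv_prefix_excl (p a b : String) (hne : ¬ (a.toList <+: b.toList) ∧ ¬ (b.toList <+: a.toList))
    (ha : PySem.Str.startswith p a = true) : PySem.Str.startswith p b = false := by
  by_contra h
  rw [Bool.not_eq_false] at h
  simp only [PySem.Str.startswith_eq, PySem.Chars.startswith_iff] at ha h
  rcases List.prefix_or_prefix_of_prefix ha h with h' | h'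
  · exact hne.1 h'
  · exact hne.2 h'

theorem pv_fold_inv (plugins : List String) (w l m o : List String) :
    plugins.foldl
      (fun (c : List String × List String × List String × List String) plugin =>
        if PySem.Str.startswith plugin "windows" then (c.1 ++ [plugin], c.2.1, c.2.2.1, c.2.2.2)
        else if PySem.Str.startswith plugin "linux" then (c.1, c.2.1 ++ [plugin], c.2.2.1, c.2.2.2)
        else if PySem.Str.startswith plugin "mac" then (c.1, c.2.1, c.2.2.1 ++ [plugin], c.2.2.2)
        else (c.1, c.2.1, c.2.2.1, c.2.2.2 ++ [plugin]))
      (w, l, m, o)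
    = (w ++ plugins.filter (fun p => PySem.Str.startswith p "windows"),
       l ++ plugins.filter (fun p => PySem.Str.startswith p "linux"),
       m ++ plugins.filter (fun p => PySem.Str.startswith p "mac"),
       o ++ plugins.filter (fun p =>
         !(PySem.Str.startswith p "windows" || PySem.Str.startswith p "linux"
           || PySem.Str.startswith p "mac"))) := by
  induction plugins generalizing w l m o with
  | nil => simp
  | cons p ps ih =>
    simp only [List.foldl_cons, List.filter_cons]
    by_cases hw : PySem.Str.startswith p "windows" = true
    · have hl := pv_prefix_excl p "windows" "linux" (by decide) hw
      have hm := pv_prefix_excl p "windows" "mac" (by decide) hw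
      simp only [hw, hl, hm, if_true, Bool.false_eq_true, if_false, ih, List.append_assoc,
        List.singleton_append, Bool.or_self, Bool.not_false, Bool.true_or, Bool.not_true]
    · rw [Bool.not_eq_true] at hw
      by_cases hl : PySem.Str.startswith p "linux" = true
      · have hm := pv_prefix_excl p "linux" "mac" (by decide) hl
        simp only [hw, hl, hm, if_true, Bool.false_eq_true, if_false, ih, List.append_assoc,
          List.singleton_append, Bool.false_or, Bool.true_or, Bool.not_true]
      · rw [Bool.not_eq_true] at hl
        by_cases hm : PySem.Str.startswith p "mac" = true
        · simp only [hw, hl, hm, if_true, Bool.false_eq_true, if_false, ih, List.append_assoc,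
            List.singleton_append, Bool.false_or, Bool.not_true]
        · rw [Bool.not_eq_true] at hm
          simp only [hw, hl, hm, if_true, Bool.false_eq_true, if_false, ih, List.append_assoc,
            List.singleton_append, Bool.false_or, Bool.not_false]

-- ===== VERDICT (by name: the statement is the Claim_ definition above) =====
theorem categorize_plugins_spec : Claim_equal_categorize_plugins := by
  intro plugins _
  unfold Spec_categorize_plugins categorize_plugins categorize_plugins_alt pvCatTable
  rw [pv_fold_inv]
  simp
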